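-- pv_equiv track=rewrite | github.com/supriya-project/supriya | supriya/utils/iterables.py | iterate_nwise
-- ===== SOURCE A (Python) =====
-- import itertools
-- from typing import (
--     Dict,
--     Generator,
--     Generic,
--     Iterable,
--     List,
--     Optional,
--     Sequence,
--     Tuple,
--     Type,
--     TypeVar,
--     Union,
-- )
--
-- T = TypeVar("T")
--
-- def iterate_nwise(
--     iterable: Iterable[T], n: int = 2
-- ) -> Generator[Sequence[T], None, None]:
--     iterables = itertools.tee(iterable, n)
--     temp: List[Iterable[T]] = []
--     for idx, it in enumerate(iterables):
--         it = itertools.islice(it, idx, None)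
--         temp.append(it)
--     yield from zip(*temp)
-- ===== SOURCE B (Python) =====
-- from collections import deque
--
--
-- def iterate_nwise(iterable, n=2):
--     if n <= 0:
--         return
--     window = deque(maxlen=n)
--     for x in iterable:
--         window.append(x)
--         if len(window) == n:
--             yield tuple(window)
-- ===== Notes on version B (the rewrite author's own statement) =====
-- stated objective: idiomatic
-- what changed: Replaces the tee/islice/zip construction over n parallel iterators with a single pass maintaining a deque(maxlen=n) sliding window that yields a tuple whenever it is full.
import Mathlib
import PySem

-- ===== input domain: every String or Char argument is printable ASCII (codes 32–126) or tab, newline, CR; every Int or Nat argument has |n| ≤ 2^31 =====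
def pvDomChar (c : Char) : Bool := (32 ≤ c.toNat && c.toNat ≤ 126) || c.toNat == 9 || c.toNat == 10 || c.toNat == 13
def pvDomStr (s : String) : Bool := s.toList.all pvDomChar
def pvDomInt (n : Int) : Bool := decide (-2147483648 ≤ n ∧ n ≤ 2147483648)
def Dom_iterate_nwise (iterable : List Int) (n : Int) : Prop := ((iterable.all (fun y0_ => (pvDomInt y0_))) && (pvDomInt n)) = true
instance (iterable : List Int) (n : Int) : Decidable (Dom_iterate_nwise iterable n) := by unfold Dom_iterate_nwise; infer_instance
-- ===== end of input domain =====

-- B replaces A's tee/islice/zip construction with a single pass keeping a sliding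
-- window of the last n elements (idiomatic; same cost). Return value only
-- (both Pythons are generators; we compare the yielded sequences as lists).

-- ===== PORT A =====
-- zip(*temp): succeeds extracting one element from every iterator, or stops.
def pyHeads? : List (List Int) → Option (List Int)
  | [] => some []
  | [] :: _ => none
  | (x :: _) :: rest => (pyHeads? rest).map (x :: ·)

-- zip over a list of lists; `fuel` is only a totality guard (each step shortens
-- every list by one, so `first list length + 1` fuel is always enough).
def pyZipN (fuel : Nat) (ls : List (List Int)) : List (List Int) :=
  match fuel with
  | 0 => []
  | fuel + 1 =>
    match ls with
    | [] => []
    | _ :: _ =>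
      match pyHeads? ls with
      | none => []
      | some hs => hs :: pyZipN fuel (ls.map List.tail)

-- itertools.tee(iterable, n) then islice(it, idx, None) = the idx-th drop of the list.
def iterate_nwise (iterable : List Int) (n : Int) : List (List Int) :=
  pyZipN (iterable.length + 1) ((List.range n.toNat).map (fun idx => iterable.drop idx))

-- ===== PORT B =====
-- single pass: deque(maxlen=n) sliding window, yield a copy whenever full
def iterate_nwise_alt (iterable : List Int) (n : Int) : List (List Int) :=
  if n ≤ 0 then []
  else
    (iterable.foldl
      (fun (s : List Int × List (List Int)) x =>
        let w := if s.1.length = n.toNat then s.1.tail ++ [x] else s.1 ++ [x]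
        (w, if w.length = n.toNat then s.2 ++ [w] else s.2))
      ([], [])).2

-- ===== PRECONDITION & SPEC =====
-- A raises ValueError (itertools.tee) for negative n; excluded.
def Pre_iterate_nwise (iterable : List Int) (n : Int) : Prop := 0 ≤ n
instance (iterable : List Int) (n : Int) : Decidable (Pre_iterate_nwise iterable n) := by unfold Pre_iterate_nwise; infer_instance
def pvWitness_iterate_nwise : List Int × Int := ([1, 2, 3], 2)

def Spec_iterate_nwise (iterable : List Int) (n : Int) (out : List (List Int)) : Prop := out = iterate_nwise_alt iterable n
instance (iterable : List Int) (n : Int) (out : List (List Int)) : Decidable (Spec_iterate_nwise iterable n out) := by unfold Spec_iterate_nwise; infer_instance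

-- ===== CLAIM (what is proved, stated in full; the proofs are below) =====
def Claim_equal_iterate_nwise : Prop := ∀ (iterable : List Int) (n : Int), Dom_iterate_nwise iterable n → Pre_iterate_nwise iterable n → Spec_iterate_nwise iterable n (iterate_nwise iterable n)

-- ===== LEMMAS AND PROOFS =====

-- common characterization: the list of n-windows of l
def win (n : Nat) : List Int → List (List Int)
  | [] => []
  | x :: xs => if (x :: xs).length < n ∨ n = 0 then [] else (x :: xs).take n :: win n xs

-- named form of the fold step of iterate_nwise_alt (proof helper only)
def stepB (m : Nat) (s : List Int × List (List Int)) (x : Int) : List Int × List (List Int) :=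
  let w := if s.1.length = m then s.1.tail ++ [x] else s.1 ++ [x]
  (w, if w.length = m then s.2 ++ [w] else s.2)

lemma win_short (n : Nat) (l : List Int) (h : l.length < n) : win n l = [] := by
  cases l with
  | nil => rfl
  | cons x xs => simp only [win]; rw [if_pos (Or.inl h)]

lemma win_unfold (n : Nat) (l : List Int) (hn : 0 < n) (h : n ≤ l.length) :
    win n l = l.take n :: win n l.tail := by
  cases l with
  | nil => simp at h; omega
  | cons x xs =>
    simp only [win]
    rw [if_neg (by omega)]
    rfl

lemma heads_drops (l : List Int) (k : Nat) : ∀ i,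
    pyHeads? ((List.range' i k).map (fun j => l.drop j)) =
      if i + k ≤ l.length ∨ k = 0 then some ((l.drop i).take k) else none := by
  induction k with
  | zero => intro i; simp [pyHeads?]
  | succ k ih =>
    intro i
    rw [List.range'_succ]
    by_cases hi : i < l.length
    · obtain ⟨x, xs, hx⟩ : ∃ x xs, l.drop i = x :: xs := by
        cases hd : l.drop i with
        | nil => exfalso; have := congrArg List.length hd; simp at this; omega
        | cons a b => exact ⟨a, b, rfl⟩
      simp only [List.map_cons, hx, pyHeads?, ih (i + 1)]
      have hx1 : l.drop (i + 1) = xs := by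
        rw [← List.tail_drop, hx]; rfl
      by_cases hk : i + 1 + k ≤ l.length ∨ k = 0
      · rw [if_pos hk, if_pos (by omega)]
        simp [hx1]
      · rw [if_neg hk, if_neg (by omega)]
        rfl
    · have hd : l.drop i = [] := by
        apply List.drop_eq_nil_of_le; omega
      simp only [List.map_cons, hd, pyHeads?]
      rw [if_neg (by omega)]

lemma map_tail_drops (l : List Int) (k : Nat) :
    ((List.range' 0 k).map (fun j => l.drop j)).map List.tail =
      (List.range' 0 k).map (fun j => l.tail.drop j) := by
  rw [List.map_map]
  apply List.map_congr_left
  intro i _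
  show (l.drop i).tail = l.tail.drop i
  rw [List.tail_drop, List.drop_tail]

lemma zipN_drops (n : Nat) (l : List Int) : ∀ fuel, l.length < fuel →
    pyZipN fuel ((List.range' 0 n).map (fun j => l.drop j)) = win n l := by
  induction l with
  | nil =>
    intro fuel hf
    cases fuel with
    | zero => omega
    | succ fuel =>
      cases n with
      | zero => rfl
      | succ m => rfl
  | cons x xs ih =>
    intro fuel hf
    cases fuel with
    | zero => omega
    | succ fuel =>
      cases n with
      | zero => rfl
      | succ m =>
        have hh := heads_drops (x :: xs) (m + 1) 0
        have htails := map_tail_drops (x :: xs) (m + 1)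
        have hne : (List.range' 0 (m + 1)).map (fun j => (x :: xs).drop j) =
            (x :: xs) :: (List.range' 1 m).map (fun j => (x :: xs).drop j) := by
          rw [List.range'_succ]; rfl
        rw [hne] at hh htails ⊢
        by_cases hlen : m + 1 ≤ (x :: xs).length
        · rw [if_pos (by omega)] at hh
          simp only [pyZipN, hh]
          rw [htails]
          show _ :: pyZipN fuel ((List.range' 0 (m + 1)).map (fun j => xs.drop j)) = _
          rw [ih fuel (by simp only [List.length_cons] at hf; omega)]
          rw [win_unfold (m + 1) (x :: xs) (by omega) hlen]
          simp
        · simp only [List.length_cons] at hlen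
          rw [if_neg (fun hcon => hcon.elim (fun h1 => by simp only [List.length_cons] at h1; omega) (fun h1 => by omega))] at hh
          simp only [pyZipN, hh]
          rw [win_short (m + 1) (x :: xs) (by simp only [List.length_cons]; omega)]

lemma foldB (m : Nat) (hm : 0 < m) : ∀ (l w : List Int) (acc : List (List Int)),
    w.length ≤ m →
    (List.foldl (stepB m) (w, acc) l).2
    = acc ++ win m ((if w.length = m then w.tail else w) ++ l) := by
  intro l
  induction l with
  | nil =>
    intro w acc hw
    simp only [List.foldl_nil, List.append_nil]
    have hlt : (if w.length = m then w.tail else w).length < m := by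
      split_ifs with h
      · cases w with
        | nil => simp at h; omega
        | cons y ys => simp only [List.tail_cons, List.length_cons] at h ⊢; omega
      · omega
    rw [win_short _ _ hlt, List.append_nil]
  | cons x xs ih =>
    intro w acc hw
    by_cases hfull : w.length = m
    · have hwne : w ≠ [] := by intro h; rw [h] at hfull; simp at hfull; omega
      have hw1 : (w.tail ++ [x]).length = m := by
        simp [List.length_tail]; omega
      have hstep : stepB m (w, acc) x = (w.tail ++ [x], acc ++ [w.tail ++ [x]]) := by
        simp only [stepB]
        rw [if_pos hfull, if_pos hw1]
      rw [List.foldl_cons, hstep, ih (w.tail ++ [x]) (acc ++ [w.tail ++ [x]]) (by omega)]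
      rw [if_pos hw1, if_pos hfull]
      rw [win_unfold m (w.tail ++ x :: xs) hm (by simp [List.length_tail]; omega)]
      have ht : (w.tail ++ x :: xs).take m = w.tail ++ [x] := by
        rw [List.take_append]
        have h1 : m - w.tail.length = 1 := by simp [List.length_tail]; omega
        rw [List.take_of_length_le (by simp [List.length_tail]; omega), h1]
        rfl
      have htl : (w.tail ++ x :: xs).tail = (w.tail ++ [x]).tail ++ xs := by
        cases hwt : w.tail with
        | nil => simp
        | cons y ys => simp
      rw [ht, htl, List.append_assoc]
      simp
    · have hwlt : w.length < m := by omega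
      by_cases hw1 : (w ++ [x]).length = m
      · have hstep : stepB m (w, acc) x = (w ++ [x], acc ++ [w ++ [x]]) := by
          simp only [stepB]
          rw [if_neg hfull, if_pos hw1]
        rw [List.foldl_cons, hstep, ih (w ++ [x]) (acc ++ [w ++ [x]]) (by omega)]
        rw [if_pos hw1, if_neg hfull]
        rw [win_unfold m (w ++ x :: xs) hm (by simp only [List.length_append] at hw1 ⊢; simp at hw1 ⊢; omega)]
        have ht : (w ++ x :: xs).take m = w ++ [x] := by
          rw [List.take_append]
          have h1 : m - w.length = 1 := by simp at hw1; omega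
          rw [List.take_of_length_le (by omega), h1]
          rfl
        have htl : (w ++ x :: xs).tail = (w ++ [x]).tail ++ xs := by
          cases w with
          | nil => simp
          | cons y ys => simp
        rw [ht, htl, List.append_assoc]
        simp
      · have hstep : stepB m (w, acc) x = (w ++ [x], acc) := by
          simp only [stepB]
          rw [if_neg hfull, if_neg hw1]
        rw [List.foldl_cons, hstep, ih (w ++ [x]) acc (by simp at hw1 ⊢; omega)]
        rw [if_neg hw1, if_neg hfull]
        simp

-- ===== VERDICT (by name: the statement is the Claim_ definition above) =====
theorem iterate_nwise_spec : Claim_equal_iterate_nwise := by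
  intro iterable n _ hpre
  show iterate_nwise iterable n = iterate_nwise_alt iterable n
  unfold iterate_nwise iterate_nwise_alt
  by_cases hn : n ≤ 0
  · have h0 : n = 0 := le_antisymm hn hpre
    subst h0
    simp [pyZipN]
  · rw [if_neg hn]
    have hm : 0 < n.toNat := by omega
    have hL : (fun (s : List Int × List (List Int)) x =>
        let w := if s.1.length = n.toNat then s.1.tail ++ [x] else s.1 ++ [x]
        (w, if w.length = n.toNat then s.2 ++ [w] else s.2)) = stepB n.toNat := rfl
    rw [List.range_eq_range',
      zipN_drops n.toNat iterable (iterable.length + 1) (by omega), hL,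
      foldB n.toNat hm iterable [] [] (by simp)]
    rw [if_neg (by simp; omega)]
    simp
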